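-- pv_equiv track=rewrite | github.com/bsdphk/PyRevEng | cpus/m68000.py | reglist_word
-- ===== SOURCE A (Python) =====
-- def reglist_word(w, p, l):
-- 	w = w & 0xff
-- 	if (w == 0):
-- 		return ""
-- 	i = 0
-- 	s = ""
-- 	while (i < 8):
-- 		if (w & (1 << i)):
-- 			s = s + "," + p + l[i]
-- 			j = i
-- 			while ((w & (1 << j))):
-- 				j = j + 1
-- 			if (j > i + 1):
-- 				s = s + "-" + l[j - 1]
-- 				i = j - 1
-- 		i = i + 1
-- 	return s
-- ===== SOURCE B (Python) =====
-- def reglist_word(w, p, l):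
--     w &= 0xff
--     parts = []
--     run_start = None
--     for i in range(9):  # 9th step is a sentinel that flushes a run ending at bit 7
--         bit = i < 8 and (w >> i) & 1
--         if bit and run_start is None:
--             run_start = i
--         elif not bit and run_start is not None:
--             seg = "," + p + l[run_start]
--             if i - 1 > run_start:
--                 seg += "-" + l[i - 1]
--             parts.append(seg)
--             run_start = None
--     return "".join(parts)
-- ===== Notes on version B (the rewrite author's own statement) =====
-- stated objective: alternative
-- what changed: Replaced A's outer loop with an inner run-skipping while and i-jumping by a single linear scan over the 8 bits (plus one sentinel step) that tracks the current run's start index and flushes each run as one segment into a list joined at the end.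
import Mathlib
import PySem

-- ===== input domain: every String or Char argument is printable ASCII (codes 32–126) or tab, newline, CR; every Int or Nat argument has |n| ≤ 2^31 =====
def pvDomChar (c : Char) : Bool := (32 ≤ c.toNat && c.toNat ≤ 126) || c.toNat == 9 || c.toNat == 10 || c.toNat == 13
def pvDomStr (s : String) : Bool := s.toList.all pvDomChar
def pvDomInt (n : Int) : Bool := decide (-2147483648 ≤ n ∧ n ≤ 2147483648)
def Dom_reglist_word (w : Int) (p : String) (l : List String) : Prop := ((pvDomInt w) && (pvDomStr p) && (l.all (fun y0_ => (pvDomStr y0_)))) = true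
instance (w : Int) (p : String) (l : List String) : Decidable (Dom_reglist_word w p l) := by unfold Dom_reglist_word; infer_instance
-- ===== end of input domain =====

-- B replaces A's outer loop with a nested run-skipping while by a single linear scan
-- (with one sentinel step) that tracks the start of the current run and flushes each
-- run as one segment; same return value everywhere A returns (objective: alternative).

-- ===== PORT A =====
-- inner 'while (w & (1 << j)): j += 1' (fuel 9 suffices: v < 256, so bit 8 is clear)
def runEndA (v : Nat) : Nat → Nat → Nat
  | 0, j => j
  | f+1, j => if v &&& (1 <<< j) ≠ 0 then runEndA v f (j+1) else j

-- outer 'while (i < 8)' loop of A; i strictly increases each step, so fuel 8 suffices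
def loopA (v : Nat) (p : String) (l : List String) : Nat → Nat → String → String
  | 0, _, s => s
  | f+1, i, s =>
    if i < 8 then
      if v &&& (1 <<< i) ≠ 0 then
        let s1 := s ++ "," ++ p ++ PySem.List.pyGetD l (i : Int) ""
        let j := runEndA v 9 i
        if j > i + 1 then
          loopA v p l f ((j-1)+1) (s1 ++ "-" ++ PySem.List.pyGetD l ((j:Int) - 1) "")
        else loopA v p l f (i+1) s1
      else loopA v p l f (i+1) s
    else s

def reglist_word (w : Int) (p : String) (l : List String) : String :=
  let v : Nat := (PySem.Int.band w 255).toNat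
  if v = 0 then "" else loopA v p l 8 0 ""

-- ===== PORT B =====
-- one step of B's scan: state = (segments so far, start of the current run, if any)
def stepB (v : Nat) (p : String) (l : List String) (st : List String × Option Nat) (i : Nat) : List String × Option Nat :=
  let bit : Bool := decide (i < 8) && ((v >>> i) &&& 1 != 0)
  match st.2 with
  | none => if bit then (st.1, some i) else st
  | some r =>
    if bit then st
    else
      let seg := "," ++ p ++ PySem.List.pyGetD l (r : Int) ""
      let seg := if i - 1 > r then seg ++ "-" ++ PySem.List.pyGetD l ((i : Int) - 1) "" else seg
      (st.1 ++ [seg], none)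

def reglist_word_alt (w : Int) (p : String) (l : List String) : String :=
  let v : Nat := (PySem.Int.band w 255).toNat
  PySem.Str.join "" ((List.range 9).foldl (stepB v p l) ([], none)).1

-- ===== PRECONDITION & SPEC =====
-- Pre_ excludes exactly the inputs on which Python A raises IndexError: a set bit of
-- (w & 0xff) whose index is not a valid index into l (B raises there too).
def Pre_reglist_word (w : Int) (p : String) (l : List String) : Prop :=
  ∀ i : Nat, i < 8 → (PySem.Int.band w 255).toNat &&& (1 <<< i) ≠ 0 → i < l.length
instance (w : Int) (p : String) (l : List String) : Decidable (Pre_reglist_word w p l) := by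
  unfold Pre_reglist_word; infer_instance

def pvWitness_reglist_word : Int × String × List String := (3, "D", ["0", "1"])

def Spec_reglist_word (w : Int) (p : String) (l : List String) (out : String) : Prop := out = reglist_word_alt w p l
instance (w : Int) (p : String) (l : List String) (out : String) : Decidable (Spec_reglist_word w p l out) := by unfold Spec_reglist_word; infer_instance

-- ===== CLAIM (what is proved, stated in full; the proofs are below) =====
def Claim_equal_reglist_word : Prop := ∀ (w : Int) (p : String) (l : List String), Dom_reglist_word w p l → Pre_reglist_word w p l → Spec_reglist_word w p l (reglist_word w p l)

-- ===== LEMMAS AND PROOFS =====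
theorem band255_toNat_lt (w : Int) : (PySem.Int.band w 255).toNat < 256 := by
  unfold PySem.Int.band
  split_ifs with h1 h2 h2
  · have := Nat.and_le_right (n := w.toNat) (m := (255 : Int).toNat)
    simp at this ⊢
    omega
  · omega
  · simp
    omega
  · omega

set_option maxHeartbeats 1600000 in
theorem loopA_eq_scanB (v : Nat) (hv : v < 256) (p : String) (l : List String) :
    (if v = 0 then "" else loopA v p l 8 0 "") =
      PySem.Str.join "" ((List.range 9).foldl (stepB v p l) ([], none)).1 := by
  interval_cases v <;>
  · apply String.toList_inj.mp
    simp [loopA, runEndA, stepB, List.range_succ, PySem.Str.join, PySem.Chars.join,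
          String.toList_ofList, List.intercalate]

-- ===== VERDICT (by name: the statement is the Claim_ definition above) =====
theorem reglist_word_spec : Claim_equal_reglist_word := by
  intro w p l _hd _hpre
  unfold Spec_reglist_word reglist_word reglist_word_alt
  exact loopA_eq_scanB _ (band255_toNat_lt w) p l
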